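-- pv_equiv track=rewrite | github.com/qwerasdzx-123/crypto_gui | base_encoding.py | _base91_92_decode
-- ===== SOURCE A (Python) =====
-- def _base91_92_decode(text: str, chars: str, base: int) -> str:
--     v = -1
--     b = 0
--     n = 0
--     out = []
--     for c in text:
--         if c not in chars:
--             continue
--         i = chars.index(c)
--         if v < 0:
--             v = i
--         else:
--             v += i * base
--             b |= v << n
--             n += 13 if (v & 8191) > 88 else 14
--             while n > 7:
--                 out.append((b & 255))
--                 b >>= 8
--                 n -= 8
--             v = -1
--     if v + 1:
--         out.append((b | v << n))
--     return bytes(out).decode('utf-8', errors='ignore')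
-- ===== SOURCE B (Python) =====
-- def _base91_92_decode(text: str, chars: str, base: int) -> str:
--     pos = {}
--     for i, c in enumerate(chars):
--         pos.setdefault(c, i)
--     idxs = [pos[c] for c in text if c in pos]
--     big = 0
--     nbits = 0
--     it = iter(idxs)
--     for i0, i1 in zip(it, it):
--         v = i0 + i1 * base
--         big |= v << nbits
--         nbits += 13 if (v & 8191) > 88 else 14
--     if len(idxs) % 2:
--         big |= idxs[-1] << nbits
--         nbytes = nbits // 8 + 1
--     else:
--         nbytes = nbits // 8
--     return bytes((big >> (8 * i)) & 255 for i in range(nbytes)).decode('utf-8', errors='ignore')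
-- ===== Notes on version B (the rewrite author's own statement) =====
-- stated objective: alternative
-- what changed: A runs a per-character sentinel state machine (v,b,n) with an inner while-loop that drains and appends output bytes as it goes; B instead builds a position table and the symbol-index list, folds the whole bit stream into ONE big integer with no intermediate byte emission, computes the byte count from the final bit offset, and slices all bytes out of that integer in a single final pass.
import Mathlib
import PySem

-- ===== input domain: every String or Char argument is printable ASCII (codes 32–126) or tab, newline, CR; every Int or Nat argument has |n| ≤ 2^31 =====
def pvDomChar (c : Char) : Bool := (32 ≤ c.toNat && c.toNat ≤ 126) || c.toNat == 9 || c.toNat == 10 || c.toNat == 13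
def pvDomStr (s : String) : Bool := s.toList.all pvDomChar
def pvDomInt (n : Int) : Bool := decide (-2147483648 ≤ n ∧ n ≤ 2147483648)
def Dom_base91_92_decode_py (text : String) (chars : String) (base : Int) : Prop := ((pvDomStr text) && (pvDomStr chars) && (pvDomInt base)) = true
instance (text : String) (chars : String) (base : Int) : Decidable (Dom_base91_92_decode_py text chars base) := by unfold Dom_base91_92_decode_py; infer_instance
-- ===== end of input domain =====

-- B replaces A's per-character sentinel state machine with its inner byte-drain loop by: a position
-- table + index list, then accumulation of the WHOLE bit stream into one big integer (no incremental
-- byte emission), then one final pass slicing every byte out of that integer (objective: alternative).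
-- Return-value equivalence only; neither version mutates its arguments.

-- ===== PORT A =====

-- the 'while n > 7: out.append(b & 255); b >>= 8; n -= 8' drain loop of A
def pvDrain (b n : Int) (out : List Int) : Int × Int × List Int :=
  if 7 < n then pvDrain (b >>> (8 : Nat)) (n - 8) (out ++ [PySem.Int.band b 255]) else (b, n, out)
termination_by n.toNat
decreasing_by omega

-- bytes(out).decode('utf-8', errors='ignore'), hand-ported byte state machine (shared verbatim by
-- A and B): exact for byte values 0..255 — Pre_ admits only inputs on which bytes(out) is valid
def pvUtf8Ignore : (bs : List Int) → List Char
  | [] => []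
  | b0 :: t =>
    if b0 < 0x80 then Char.ofNat b0.toNat :: pvUtf8Ignore t
    else if b0 < 0xC2 then pvUtf8Ignore t
    else if b0 < 0xE0 then
      match t with
      | [] => []
      | b1 :: t1 =>
        if 0x80 ≤ b1 ∧ b1 < 0xC0 then
          Char.ofNat (((b0.toNat &&& 0x1F) <<< 6) ||| (b1.toNat &&& 0x3F)) :: pvUtf8Ignore t1
        else pvUtf8Ignore (b1 :: t1)
    else if b0 < 0xF0 then
      match t with
      | [] => []
      | b1 :: t1 =>
        if (if b0 = 0xE0 then (0xA0 : Int) else 0x80) ≤ b1 ∧ b1 < (if b0 = 0xED then (0xA0 : Int) else 0xC0) then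
          match t1 with
          | [] => []
          | b2 :: t2 =>
            if 0x80 ≤ b2 ∧ b2 < 0xC0 then
              Char.ofNat (((b0.toNat &&& 0xF) <<< 12) ||| ((b1.toNat &&& 0x3F) <<< 6) ||| (b2.toNat &&& 0x3F)) :: pvUtf8Ignore t2
            else pvUtf8Ignore (b2 :: t2)
        else pvUtf8Ignore (b1 :: t1)
    else if b0 < 0xF5 then
      match t with
      | [] => []
      | b1 :: t1 =>
        if (if b0 = 0xF0 then (0x90 : Int) else 0x80) ≤ b1 ∧ b1 < (if b0 = 0xF4 then (0x90 : Int) else 0xC0) then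
          match t1 with
          | [] => []
          | b2 :: t2 =>
            if 0x80 ≤ b2 ∧ b2 < 0xC0 then
              match t2 with
              | [] => []
              | b3 :: t3 =>
                if 0x80 ≤ b3 ∧ b3 < 0xC0 then
                  Char.ofNat (((b0.toNat &&& 0x7) <<< 18) ||| ((b1.toNat &&& 0x3F) <<< 12) ||| ((b2.toNat &&& 0x3F) <<< 6) ||| (b3.toNat &&& 0x3F)) :: pvUtf8Ignore t3
                else pvUtf8Ignore (b3 :: t3)
            else pvUtf8Ignore (b2 :: t2)
        else pvUtf8Ignore (b1 :: t1)
    else pvUtf8Ignore t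

-- the body of A's 'for c in text' loop; state (v, b, n, out)
def pvStepA (chars : List Char) (base : Int) : Int × Int × Int × List Int → Char → Int × Int × Int × List Int
  | (v, b, n, out), c =>
    if chars.contains c = false then (v, b, n, out)    -- 'if c not in chars: continue'
    else
      -- chars.index(c): first occurrence; exact, c is a single character
      let i : Int := ((PySem.List.index? chars c).getD 0 : Nat)
      if v < 0 then (i, b, n, out)
      else
        let v := v + i * base
        let b := PySem.Int.bor b (v <<< n.toNat)     -- n ≥ 0 throughout, so .toNat is exact
        let n := n + (if 88 < PySem.Int.band v 8191 then 13 else 14)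
        let (b, n, out) := pvDrain b n out
        (-1, b, n, out)

def base91_92_decode_py (text : String) (chars : String) (base : Int) : String :=
  let st := text.toList.foldl (pvStepA chars.toList base) (-1, 0, 0, [])
  let v := st.1
  let b := st.2.1
  let n := st.2.2.1
  let out := st.2.2.2
  let out := if v + 1 ≠ 0 then out ++ [PySem.Int.bor b (v <<< n.toNat)] else out   -- 'if v + 1:'
  String.ofList (pvUtf8Ignore out)

-- ===== PORT B =====

-- zip(it, it): consume the index list two at a time
def pvToPairs : List Int → List (Int × Int)
  | a :: b :: t => (a, b) :: pvToPairs t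
  | _ => []

-- the body of B's 'for i0, i1 in zip(it, it)' loop; state (big, nbits) — no byte emission here
def pvStepBig (base : Int) : Int × Int → Int × Int → Int × Int
  | (big, n), p =>
    let v := p.1 + p.2 * base
    (PySem.Int.bor big (v <<< n.toNat), n + (if 88 < PySem.Int.band v 8191 then 13 else 14))

def base91_92_decode_py_alt (text : String) (chars : String) (base : Int) : String :=
  let pos := (PySem.List.enumerate chars.toList 0).foldl
    (fun (d : PySem.Dict Char Int) p => d.setdefault p.2 p.1) PySem.Dict.empty
  let idxs := text.toList.filterMap (fun c => pos.get? c)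
  let st := (pvToPairs idxs).foldl (pvStepBig base) (0, 0)
  -- 'if len(idxs) % 2: big |= idxs[-1] << nbits; nbytes = nbits//8 + 1 else: nbytes = nbits//8'
  let bn :=
    if idxs.length % 2 = 1 then
      (PySem.Int.bor st.1 ((idxs.getLast?.getD 0) <<< st.2.toNat), PySem.Int.floordiv st.2 8 + 1)
    else (st.1, PySem.Int.floordiv st.2 8)
  -- 'bytes((big >> (8*i)) & 255 for i in range(nbytes))'
  String.ofList (pvUtf8Ignore ((PySem.List.pyRange 0 bn.2 1).map
    (fun i => PySem.Int.band (bn.1 >>> (8 * i.toNat : Nat)) 255)))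

-- ===== PRECONDITION & SPEC =====

-- the list of alphabet indices of the symbols of text (first occurrence, as chars.index)
def pvIdxs (text chars : List Char) : List Int :=
  text.filterMap (fun c =>
    if chars.contains c then some (((PySem.List.index? chars c).getD 0 : Nat) : Int) else none)

-- one accumulation step of the symbol stream's bit offset and OR (no byte output)
def pvTrailStep (base : Int) (acc : Option Int × Int × Int) (i : Int) : Option Int × Int × Int :=
  match acc with
  | (none, big, n) => (some i, big, n)
  | (some j, big, n) =>
      (none, PySem.Int.bor big ((j + i * base) <<< n.toNat),
       n + (if 88 < PySem.Int.band (j + i * base) 8191 then 13 else 14))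

-- the value A's trailing 'out.append(b | v << n)' would append: the bit stream's OR shifted past
-- its full bytes (this is data of the input stream, not a byte of either output)
def pvTrail (text chars : List Char) (base : Int) : Int :=
  let idxs := pvIdxs text chars
  let st := (idxs.foldl (pvTrailStep base) (none, 0, 0)).2
  (PySem.Int.bor st.1 ((idxs.getLast?.getD 0) <<< st.2.toNat)) >>> (8 * (st.2.toNat / 8))

-- Pre_ excludes EXACTLY the inputs on which A raises (no input on which A returns is excluded):
-- with an odd number of alphabet symbols in text, A's trailing append feeds bytes() the value
-- pvTrail, and bytes() raises ValueError iff it lies outside 0..255; the crash condition is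
-- data-dependent, so Pre_ necessarily evaluates the bit offsets of the stream (it computes no
-- output byte of either program).
def Pre_base91_92_decode_py (text : String) (chars : String) (base : Int) : Prop :=
  (pvIdxs text.toList chars.toList).length % 2 = 0 ∨
    (0 ≤ pvTrail text.toList chars.toList base ∧ pvTrail text.toList chars.toList base ≤ 255)
instance (text : String) (chars : String) (base : Int) : Decidable (Pre_base91_92_decode_py text chars base) := by unfold Pre_base91_92_decode_py; infer_instance

def pvWitness_base91_92_decode_py : String × String × Int := ("ab", "ab", 91)

def Spec_base91_92_decode_py (text : String) (chars : String) (base : Int) (out : String) : Prop := out = base91_92_decode_py_alt text chars base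
instance (text : String) (chars : String) (base : Int) (out : String) : Decidable (Spec_base91_92_decode_py text chars base out) := by unfold Spec_base91_92_decode_py; infer_instance

-- ===== CLAIM (what is proved, stated in full; the proofs are below) =====
def Claim_equal_base91_92_decode_py : Prop := ∀ (text : String) (chars : String) (base : Int), Dom_base91_92_decode_py text chars base → Pre_base91_92_decode_py text chars base → Spec_base91_92_decode_py text chars base (base91_92_decode_py text chars base)


-- ===== LEMMAS AND PROOFS =====

-- ---------- A's char loop = a pair machine over the index list (structure of A) ----------

-- the per-index step A performs once the membership test and index lookup are factored out
def pvStepIdx (base : Int) : Int × Int × Int × List Int → Int → Int × Int × Int × List Int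
  | (v, b, n, out), i =>
    if v < 0 then (i, b, n, out)
    else
      let v := v + i * base
      let b := PySem.Int.bor b (v <<< n.toNat)
      let n := n + (if 88 < PySem.Int.band v 8191 then 13 else 14)
      let (b, n, out) := pvDrain b n out
      (-1, b, n, out)

-- the pair step with A's byte-drain, the intermediate machine between A and B
def pvStepPair (base : Int) : Int × Int × List Int → Int × Int → Int × Int × List Int
  | (b, n, out), p =>
    let v := p.1 + p.2 * base
    let b := PySem.Int.bor b (v <<< n.toNat)
    let n := n + (if 88 < PySem.Int.band v 8191 then 13 else 14)
    pvDrain b n out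

lemma pvStepA_eq (chars : List Char) (base : Int) (s : Int × Int × Int × List Int) (c : Char) :
    pvStepA chars base s c
      = if chars.contains c then pvStepIdx base s (((PySem.List.index? chars c).getD 0 : Nat) : Int)
        else s := by
  obtain ⟨v, b, n, out⟩ := s
  by_cases h : chars.contains c <;> simp [pvStepA, pvStepIdx, h]

lemma pvFoldA_eq (chars : List Char) (base : Int) :
    ∀ (cs : List Char) (s : Int × Int × Int × List Int),
      cs.foldl (pvStepA chars base) s = (pvIdxs cs chars).foldl (pvStepIdx base) s := by
  intro cs
  induction cs with
  | nil => intro s; simp [pvIdxs]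
  | cons c cs ih =>
    intro s
    rw [List.foldl_cons, pvStepA_eq]
    by_cases h : c ∈ chars
    · rw [if_pos (by simpa using h), ih]
      simp [pvIdxs, List.filterMap_cons, h]
    · rw [if_neg (by simpa using h), ih]
      simp [pvIdxs, List.filterMap_cons, h]

-- the setdefault-built position dict looks up the first index, i.e. chars.index
lemma pvPos_get? (l : List Char) :
    ∀ (s : Int) (d : PySem.Dict Char Int) (c : Char),
      ((PySem.List.enumerate l s).foldl (fun d p => d.setdefault p.2 p.1) d).get? c
        = match d.get? c with
          | some v => some v
          | none => if l.contains c then some (s + ((PySem.List.index? l c).getD 0 : Nat)) else none := by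
  induction l with
  | nil => intro s d c; cases h : d.get? c <;> simp [PySem.List.enumerate_nil, h]
  | cons x t ih =>
    intro s d c
    rw [PySem.List.enumerate_cons, List.foldl_cons, ih]
    simp only []
    by_cases hc : c = x
    · subst hc
      rw [PySem.Dict.get?_setdefault_self d c s]
      cases h : d.get? c with
      | some v => simp [h]
      | none =>
        simp only [h, Option.getD_none]
        rw [PySem.List.index?_cons_self c t]
        simp
    · rw [PySem.Dict.get?_setdefault_of_ne d s hc]
      cases h : d.get? c with
      | some v => simp [h]
      | none =>
        simp only [h]
        rw [PySem.List.index?_cons_of_ne t (fun hx => hc hx.symm)]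
        by_cases hm : t.contains c
        · have hmem : c ∈ t := by simpa using hm
          obtain ⟨k, hk⟩ : ∃ k, PySem.List.index? t c = some k := by
            have := (PySem.List.index?_isSome_iff (xs := t) (v := c)).mpr hmem
            exact Option.isSome_iff_exists.mp this
          rw [hk]
          have hx : (x :: t).contains c = true := by simp [hmem]
          rw [if_pos hm, if_pos hx]
          congr 1
          simp only [Option.map_some, Option.getD_some]
          push_cast
          ring
        · have hmem : c ∉ t := by simpa using hm
          simp [hm, List.contains_cons, hc, hmem]

-- two-at-a-time induction on the index list
def pvPairRec {motive : List Int → Prop} (h0 : motive []) (h1 : ∀ i, motive [i])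
    (h2 : ∀ i j t, motive t → motive (i :: j :: t)) : ∀ l, motive l
  | [] => h0
  | [i] => h1 i
  | i :: j :: t => h2 i j t (pvPairRec h0 h1 h2 t)

-- A's v-state pass over the index list IS the pairwise pass, with v ending as the unpaired symbol
lemma pvFoldIdx_pairs (base : Int) :
    ∀ l : List Int, (∀ x ∈ l, (0 : Int) ≤ x) → ∀ b n out,
      l.foldl (pvStepIdx base) (-1, b, n, out)
        = ((if l.length % 2 = 1 then l.getLast?.getD 0 else -1),
           (pvToPairs l).foldl (pvStepPair base) (b, n, out)) := by
  intro l
  induction l using pvPairRec with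
  | h0 => intro _ b n out; simp [pvToPairs]
  | h1 i => intro _ b n out; simp [pvStepIdx, pvToPairs]
  | h2 i j t ih =>
    intro h b n out
    have hi : (0 : Int) ≤ i := h i (by simp)
    have h1 : pvStepIdx base (-1, b, n, out) i = (i, b, n, out) := by
      simp only [pvStepIdx]
      rw [if_pos (by norm_num)]
    have hstep : pvStepIdx base (i, b, n, out) j = (-1, pvStepPair base (b, n, out) (i, j)) := by
      simp only [pvStepIdx, pvStepPair]
      rw [if_neg (by omega)]
    rw [List.foldl_cons, List.foldl_cons, h1, hstep]
    rcases hsb : pvStepPair base (b, n, out) (i, j) with ⟨b', n', out'⟩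
    rw [ih (fun x hx => h x (by simp [hx])) b' n' out']
    simp only [pvToPairs, List.foldl_cons, hsb]
    have hlen : (i :: j :: t).length % 2 = t.length % 2 := by
      simp only [List.length_cons]
      omega
    have hlast : t.length % 2 = 1 → (i :: j :: t).getLast?.getD 0 = t.getLast?.getD 0 := by
      intro hodd
      cases t with
      | nil => simp at hodd
      | cons y t' => conv_lhs => rw [List.getLast?_cons_cons, List.getLast?_cons_cons]
    rw [hlen]
    by_cases hodd : t.length % 2 = 1
    · rw [if_pos hodd, if_pos hodd, hlast hodd]
    · rw [if_neg hodd, if_neg hodd]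

-- the trail accumulator is the pairwise bit-stream fold
lemma pvTrailFold (base : Int) : ∀ (l : List Int) (big n : Int),
    (l.foldl (pvTrailStep base) (none, big, n)).2 = (pvToPairs l).foldl (pvStepBig base) (big, n) := by
  intro l
  induction l using pvPairRec with
  | h0 => intro big n; rfl
  | h1 i => intro big n; rfl
  | h2 i j t ih =>
    intro big n
    simp only [List.foldl_cons, pvToPairs]
    rw [show pvTrailStep base (none, big, n) i = (some i, big, n) from rfl]
    rw [show pvTrailStep base (some i, big, n) j
        = (none, PySem.Int.bor big ((i + j * base) <<< n.toNat),
           n + (if 88 < PySem.Int.band (i + j * base) 8191 then 13 else 14)) from rfl]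
    rw [show pvStepBig base (big, n) (i, j)
        = (PySem.Int.bor big ((i + j * base) <<< n.toNat),
           n + (if 88 < PySem.Int.band (i + j * base) 8191 then 13 else 14)) from rfl]
    exact ih _ _

lemma pvIdxs_nonneg (text chars : List Char) : ∀ x ∈ pvIdxs text chars, (0 : Int) ≤ x := by
  intro x hx
  obtain ⟨c, _, hc⟩ := List.mem_filterMap.mp hx
  by_cases h : chars.contains c
  · rw [if_pos h] at hc
    have h2 := Option.some.inj hc
    omega
  · rw [if_neg h] at hc
    simp at hc

-- ---------- integer bit lemmas ----------

lemma pvOrAddDisjoint : ∀ a : Nat, ∀ b : Nat, a &&& b = 0 → a ||| b = a + b := by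
  intro a
  induction a using Nat.strong_induction_on with
  | _ a ih =>
    intro b hab
    rcases Nat.eq_zero_or_pos a with ha | ha
    · subst ha; simp
    · have hda : Nat.bit (decide (a % 2 = 1)) (a >>> 1) = a :=
        Nat.bit_decide_mod_two_eq_one_shiftRight_one a
      have hdb : Nat.bit (decide (b % 2 = 1)) (b >>> 1) = b :=
        Nat.bit_decide_mod_two_eq_one_shiftRight_one b
      have hlt : a >>> 1 < a := by
        rw [Nat.shiftRight_one]
        omega
      rw [← hda, ← hdb] at hab ⊢
      rw [Nat.land_bit] at hab
      obtain ⟨h1, h2⟩ := Nat.bit_eq_zero_iff.mp hab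
      rw [Nat.lor_bit, ih _ hlt _ h1]
      have hva : Nat.bit (decide (a % 2 = 1)) (a >>> 1) = 2 * (a >>> 1) + (if a % 2 = 1 then 1 else 0) := by
        by_cases hp : a % 2 = 1 <;> simp [hp, Nat.bit_false_apply, Nat.bit_true_apply]
      have hvb : Nat.bit (decide (b % 2 = 1)) (b >>> 1) = 2 * (b >>> 1) + (if b % 2 = 1 then 1 else 0) := by
        by_cases hp : b % 2 = 1 <;> simp [hp, Nat.bit_false_apply, Nat.bit_true_apply]
      have hvo : Nat.bit (decide (a % 2 = 1) || decide (b % 2 = 1)) (a >>> 1 + b >>> 1)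
          = 2 * (a >>> 1 + b >>> 1) + (if a % 2 = 1 ∨ b % 2 = 1 then 1 else 0) := by
        by_cases hp : a % 2 = 1 <;> by_cases hq : b % 2 = 1 <;>
          simp [hp, hq, Nat.bit_false_apply, Nat.bit_true_apply]
      rw [hva, hvb, hvo]
      have hno : ¬ (a % 2 = 1 ∧ b % 2 = 1) := by
        intro ⟨hp, hq⟩
        rw [hp, hq] at h2
        simp at h2
      by_cases hp : a % 2 = 1 <;> by_cases hq : b % 2 = 1 <;> simp [hp, hq] at hno ⊢ <;> omega

lemma pvLdiffSub (n m : Nat) : Nat.ldiff n m = n - (n &&& m) := by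
  have hor : Nat.ldiff n m ||| (n &&& m) = n := by
    apply Nat.eq_of_testBit_eq
    intro i
    simp only [Nat.testBit_lor, Nat.testBit_ldiff, Nat.testBit_land]
    cases n.testBit i <;> cases m.testBit i <;> rfl
  have hand : Nat.ldiff n m &&& (n &&& m) = 0 := by
    apply Nat.eq_of_testBit_eq
    intro i
    simp only [Nat.testBit_land, Nat.testBit_ldiff, Nat.zero_testBit]
    cases n.testBit i <;> cases m.testBit i <;> rfl
  have := pvOrAddDisjoint _ _ hand
  omega

lemma pvBorLor (x y : Int) : PySem.Int.bor x y = Int.lor x y := by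
  unfold PySem.Int.bor
  rcases x with m | m <;> rcases y with n | n
  · have hm : (0:Int) ≤ Int.ofNat m := Int.natCast_nonneg m
    have hn : (0:Int) ≤ Int.ofNat n := Int.natCast_nonneg n
    rw [if_pos hm, if_pos hn]
    rfl
  · have hm : (0:Int) ≤ Int.ofNat m := Int.natCast_nonneg m
    have hn : ¬ (0:Int) ≤ Int.negSucc n := by rw [Int.negSucc_eq]; omega
    rw [if_pos hm, if_neg hn]
    have h1 : (-(Int.negSucc n) - 1).toNat = n := by
      rw [Int.negSucc_eq]; omega
    have h2 : (Int.ofNat m).toNat = m := rfl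
    rw [h1, h2]
    show _ = Int.negSucc (Nat.ldiff n m)
    rw [pvLdiffSub, Int.negSucc_eq]
    have hle : n &&& m ≤ n := Nat.and_le_left
    rw [Nat.cast_sub hle]
    ring
  · have hn : (0:Int) ≤ Int.ofNat n := Int.natCast_nonneg n
    have hm : ¬ (0:Int) ≤ Int.negSucc m := by rw [Int.negSucc_eq]; omega
    rw [if_neg hm, if_pos hn]
    have h1 : (-(Int.negSucc m) - 1).toNat = m := by
      rw [Int.negSucc_eq]; omega
    have h2 : (Int.ofNat n).toNat = n := rfl
    rw [h1, h2]
    show _ = Int.negSucc (Nat.ldiff m n)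
    rw [pvLdiffSub, Int.negSucc_eq]
    have hle : m &&& n ≤ m := Nat.and_le_left
    rw [Nat.cast_sub hle]
    ring
  · have hm : ¬ (0:Int) ≤ Int.negSucc m := by rw [Int.negSucc_eq]; omega
    have hn : ¬ (0:Int) ≤ Int.negSucc n := by rw [Int.negSucc_eq]; omega
    rw [if_neg hm, if_neg hn]
    have h1 : (-(Int.negSucc m) - 1).toNat = m := by
      rw [Int.negSucc_eq]; omega
    have h2 : (-(Int.negSucc n) - 1).toNat = n := by
      rw [Int.negSucc_eq]; omega
    rw [h1, h2]
    show _ = Int.negSucc (m &&& n)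
    rw [Int.negSucc_eq]
    ring

lemma pvBand255 (x : Int) : PySem.Int.band x 255 = x % 256 := by
  unfold PySem.Int.band
  rcases x with m | m
  · have hm : (0:Int) ≤ Int.ofNat m := Int.natCast_nonneg m
    rw [if_pos hm, if_pos (by norm_num : (0:Int) ≤ 255)]
    have h : m &&& (2 ^ 8 - 1) = m % 2 ^ 8 := Nat.and_two_pow_sub_one_eq_mod m 8
    norm_num at h
    have h2 : (Int.ofNat m).toNat = m := rfl
    have h3 : (255 : Int).toNat = 255 := rfl
    rw [h2, h3, h]
    have h4 : Int.ofNat m = (m : Int) := rfl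
    rw [h4]
    omega
  · have hm : ¬ (0:Int) ≤ Int.negSucc m := by rw [Int.negSucc_eq]; omega
    rw [if_neg hm, if_pos (by norm_num : (0:Int) ≤ 255)]
    have h1 : (-(Int.negSucc m) - 1).toNat = m := by
      rw [Int.negSucc_eq]; omega
    have h3 : (255 : Int).toNat = 255 := rfl
    rw [h1, h3]
    have h : 255 &&& m = m % 256 := by
      rw [Nat.land_comm]
      have h' := Nat.and_two_pow_sub_one_eq_mod m 8
      norm_num at h'
      exact h'
    rw [h]
    have hm2 : m % 256 ≤ 255 := by omega
    have h5 : Int.negSucc m = -(m : Int) - 1 := by rw [Int.negSucc_eq]; ring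
    rw [h5, Nat.cast_sub hm2]
    push_cast
    omega

-- OR splits at a bit boundary below which the right operand is zero
lemma pvSplitOrL : ∀ (m : Nat) (X b c : Int), 0 ≤ X → X < 2 ^ m →
    Int.lor (X + b * 2 ^ m) (c * 2 ^ m) = X + Int.lor b c * 2 ^ m := by
  intro m
  induction m with
  | zero =>
    intro X b c h0 h1
    have hX : X = 0 := by omega
    subst hX
    simp
  | succ m ih =>
    intro X b c h0 h1
    have hpow : (2 : Int) ^ (m + 1) = 2 ^ m * 2 := pow_succ 2 m
    have hX2a : 0 ≤ X / 2 := by omega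
    have hX2b : X / 2 < 2 ^ m := by
      have h2 : X < 2 ^ m * 2 := by rw [← hpow]; exact h1
      omega
    by_cases he : X % 2 = 1
    · have hX' : X = 2 * (X / 2) + 1 := by omega
      have hb1 : X + b * 2 ^ (m + 1) = Int.bit true (X / 2 + b * 2 ^ m) := by
        simp only [Int.bit, cond_true]
        rw [hpow]
        nlinarith [hX']
      have hb2 : c * 2 ^ (m + 1) = Int.bit false (c * 2 ^ m) := by
        simp only [Int.bit, cond_false]
        rw [hpow]; ring
      rw [hb1, hb2, Int.lor_bit, ih _ _ _ hX2a hX2b]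
      simp only [Bool.true_or, Int.bit, cond_true]
      rw [hpow]
      nlinarith [hX']
    · have hX' : X = 2 * (X / 2) := by omega
      have hb1 : X + b * 2 ^ (m + 1) = Int.bit false (X / 2 + b * 2 ^ m) := by
        simp only [Int.bit, cond_false]
        rw [hpow]
        nlinarith [hX']
      have hb2 : c * 2 ^ (m + 1) = Int.bit false (c * 2 ^ m) := by
        simp only [Int.bit, cond_false]
        rw [hpow]; ring
      rw [hb1, hb2, Int.lor_bit, ih _ _ _ hX2a hX2b]
      simp only [Bool.false_or, Int.bit, cond_false]
      rw [hpow]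
      nlinarith [hX']

lemma pvSplitOr (m : Nat) (X b c : Int) (h0 : 0 ≤ X) (h1 : X < 2 ^ m) :
    PySem.Int.bor (X + b * 2 ^ m) (c * 2 ^ m) = X + PySem.Int.bor b c * 2 ^ m := by
  rw [pvBorLor, pvBorLor]
  exact pvSplitOrL m X b c h0 h1

-- ---------- little-endian byte list value ----------

def pvLo : List Int → Int
  | [] => 0
  | o :: t => o + 256 * pvLo t

def pvBytesOK (out : List Int) : Prop := ∀ o ∈ out, 0 ≤ o ∧ o < 256

lemma pvLo_append (out : List Int) (x : Int) :
    pvLo (out ++ [x]) = pvLo out + x * 2 ^ (8 * out.length) := by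
  induction out with
  | nil => simp [pvLo]
  | cons o t ih =>
    simp only [List.cons_append, pvLo, ih, List.length_cons]
    have hpow : (2 : Int) ^ (8 * (t.length + 1)) = 2 ^ (8 * t.length) * 256 := by
      rw [show 8 * (t.length + 1) = 8 * t.length + 8 by ring, pow_add]
      norm_num
    rw [hpow]
    ring

lemma pvLo_bounds (out : List Int) (h : pvBytesOK out) :
    0 ≤ pvLo out ∧ pvLo out < 2 ^ (8 * out.length) := by
  induction out with
  | nil => simp [pvLo]
  | cons o t ih =>
    have ho := h o (by simp)
    have ht := ih (fun x hx => h x (by simp [hx]))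
    simp only [pvLo, List.length_cons]
    have hpow : (2 : Int) ^ (8 * (t.length + 1)) = 2 ^ (8 * t.length) * 256 := by
      rw [show 8 * (t.length + 1) = 8 * t.length + 8 by ring, pow_add]
      norm_num
    constructor
    · omega
    · rw [hpow]
      nlinarith [ht.1, ht.2, ho.1, ho.2]

-- byte i of the value lo(out) + t·2^(8L) is out[i], for every integer t
lemma pvByte_lo : ∀ (out : List Int), pvBytesOK out → ∀ (t : Int) (i : Nat), (hi : i < out.length) →
    PySem.Int.band ((pvLo out + t * 2 ^ (8 * out.length)) >>> (8 * i)) 255 = out[i] := by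
  intro out
  induction out with
  | nil => intro _ t i hi; simp at hi
  | cons o rest ih =>
    intro h t i hi
    have ho := h o (by simp)
    have hrest : pvBytesOK rest := fun x hx => h x (by simp [hx])
    have hpow : (2 : Int) ^ (8 * (o :: rest).length) = 256 * 2 ^ (8 * rest.length) := by
      simp only [List.length_cons]
      rw [show 8 * (rest.length + 1) = 8 + 8 * rest.length by ring, pow_add]
      norm_num
    have hval : pvLo (o :: rest) + t * 2 ^ (8 * (o :: rest).length)
        = o + 256 * (pvLo rest + t * 2 ^ (8 * rest.length)) := by
      rw [hpow]
      simp only [pvLo]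
      ring
    rw [hval]
    cases i with
    | zero =>
      rw [pvBand255]
      simp only [Nat.mul_zero, Int.shiftRight_zero]
      show (o + 256 * (pvLo rest + t * 2 ^ (8 * rest.length))) % 256 = (o :: rest)[0]
      simp only [List.getElem_cons_zero]
      generalize pvLo rest + t * 2 ^ (8 * rest.length) = K
      omega
    | succ i =>
      have hi' : i < rest.length := by simpa using hi
      have hsh : (o + 256 * (pvLo rest + t * 2 ^ (8 * rest.length))) >>> (8 * (i + 1))
          = (pvLo rest + t * 2 ^ (8 * rest.length)) >>> (8 * i) := by
        rw [Int.shiftRight_eq_div_pow, Int.shiftRight_eq_div_pow]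
        have hp : (2 : Nat) ^ (8 * (i + 1)) = 256 * 2 ^ (8 * i) := by
          rw [show 8 * (i + 1) = 8 + 8 * i by ring, pow_add]
          norm_num
        rw [hp]
        push_cast
        rw [← Int.ediv_ediv_of_nonneg (by norm_num : (0 : Int) ≤ 256)]
        congr 1
        generalize pvLo rest + t * 2 ^ (8 * rest.length) = K
        omega
      rw [hsh, ih hrest t i hi']
      simp

-- the bits past the full bytes of lo(out) + t·2^(8L) are exactly t
lemma pvHigh_lo (out : List Int) (h : pvBytesOK out) (t : Int) :
    (pvLo out + t * 2 ^ (8 * out.length)) >>> (8 * out.length) = t := by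
  obtain ⟨h0, h1⟩ := pvLo_bounds out h
  rw [Int.shiftRight_eq_div_pow]
  push_cast
  rw [Int.add_mul_ediv_right _ _ (by positivity : ((2 : Int) ^ (8 * out.length)) ≠ 0)]
  rw [Int.ediv_eq_zero_of_lt h0 h1]
  ring

-- whole-list byte extraction
lemma pvExtract (out : List Int) (h : pvBytesOK out) (t : Int) :
    (List.range out.length).map
      (fun k : Nat => PySem.Int.band ((pvLo out + t * 2 ^ (8 * out.length)) >>> (8 * k)) 255) = out := by
  apply List.ext_getElem (by simp)
  intro i h1 h2
  simp only [List.getElem_map, List.getElem_range]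
  exact pvByte_lo out h t i h2

lemma pvExtract1 (out : List Int) (h : pvBytesOK out) (t : Int) (ht0 : 0 ≤ t) (ht1 : t ≤ 255) :
    (List.range (out.length + 1)).map
      (fun k : Nat => PySem.Int.band ((pvLo out + t * 2 ^ (8 * out.length)) >>> (8 * k)) 255)
      = out ++ [t] := by
  apply List.ext_getElem (by simp)
  intro i h1 h2
  simp only [List.getElem_map, List.getElem_range]
  by_cases hi : i < out.length
  · rw [pvByte_lo out h t i hi, List.getElem_append_left hi]
  · have hieq : i = out.length := by
      have h2' := h2
      simp only [List.length_append, List.length_cons, List.length_nil] at h2'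
      omega
    subst hieq
    rw [pvHigh_lo out h t, pvBand255]
    have hget : (out ++ [t])[out.length] = t := by
      simp
    rw [hget]
    omega

-- ---------- the drain loop maintains the big-integer decomposition ----------

lemma pvDrain_eq (b n : Int) (out : List Int) :
    pvDrain b n out
      = if 7 < n then pvDrain (b >>> (8 : Nat)) (n - 8) (out ++ [PySem.Int.band b 255]) else (b, n, out) := by
  rw [pvDrain]

lemma pvDrain_inv : ∀ (k : Nat) (b n : Int) (out : List Int), n.toNat = k → 0 ≤ n → pvBytesOK out →
    pvBytesOK (pvDrain b n out).2.2 ∧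
    pvLo out + b * 2 ^ (8 * out.length)
      = pvLo (pvDrain b n out).2.2 + (pvDrain b n out).1 * 2 ^ (8 * (pvDrain b n out).2.2.length) ∧
    n + 8 * out.length = (pvDrain b n out).2.1 + 8 * (pvDrain b n out).2.2.length ∧
    0 ≤ (pvDrain b n out).2.1 ∧ (pvDrain b n out).2.1 ≤ 7 := by
  intro k
  induction k using Nat.strong_induction_on with
  | _ k ih =>
    intro b n out hk hn hok
    rw [pvDrain_eq]
    by_cases h : 7 < n
    · rw [if_pos h]
      have hok' : pvBytesOK (out ++ [PySem.Int.band b 255]) := by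
        intro x hx
        rcases List.mem_append.mp hx with hx | hx
        · exact hok x hx
        · simp only [List.mem_singleton] at hx
          subst hx
          rw [pvBand255]
          omega
      obtain ⟨c1, c2, c3, c4, c5⟩ :=
        ih (n - 8).toNat (by omega) (b >>> (8 : Nat)) (n - 8) (out ++ [PySem.Int.band b 255]) rfl (by omega) hok'
      refine ⟨c1, ?_, ?_, c4, c5⟩
      · rw [← c2, pvLo_append, pvBand255]
        have hsh : b >>> (8 : Nat) = b / 256 := by
          rw [Int.shiftRight_eq_div_pow]
          norm_num
        rw [hsh]
        simp only [List.length_append, List.length_cons, List.length_nil]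
        have hpow : (2 : Int) ^ (8 * (out.length + 1)) = 2 ^ (8 * out.length) * 256 := by
          rw [show 8 * (out.length + 1) = 8 * out.length + 8 by ring, pow_add]
          norm_num
        have hb : b = b % 256 + 256 * (b / 256) := by omega
        conv_lhs => rw [hb]
        rw [hpow]
        ring
      · simp only [List.length_append, List.length_cons, List.length_nil] at c3 ⊢
        omega
    · rw [if_neg h]
      exact ⟨hok, rfl, rfl, (by omega : (0:Int) ≤ n), (by omega : n ≤ 7)⟩

-- ---------- the pair machine maintains the big-integer decomposition ----------

lemma pvPairs_inv (base : Int) : ∀ (ps : List (Int × Int)) (b n : Int) (out : List Int) (big N : Int),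
    0 ≤ n → n ≤ 7 → pvBytesOK out →
    big = pvLo out + b * 2 ^ (8 * out.length) → N = n + 8 * out.length →
    pvBytesOK (ps.foldl (pvStepPair base) (b, n, out)).2.2 ∧
    (ps.foldl (pvStepBig base) (big, N)).1
      = pvLo (ps.foldl (pvStepPair base) (b, n, out)).2.2
        + (ps.foldl (pvStepPair base) (b, n, out)).1
          * 2 ^ (8 * (ps.foldl (pvStepPair base) (b, n, out)).2.2.length) ∧
    (ps.foldl (pvStepBig base) (big, N)).2
      = (ps.foldl (pvStepPair base) (b, n, out)).2.1
        + 8 * (ps.foldl (pvStepPair base) (b, n, out)).2.2.length ∧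
    0 ≤ (ps.foldl (pvStepPair base) (b, n, out)).2.1 ∧
    (ps.foldl (pvStepPair base) (b, n, out)).2.1 ≤ 7 := by
  intro ps
  induction ps with
  | nil =>
    intro b n out big N h1 h2 h3 h4 h5
    exact ⟨h3, h4, by simpa using h5, h1, h2⟩
  | cons p ps ih =>
    intro b n out big N h1 h2 h3 h4 h5
    simp only [List.foldl_cons]
    set v := p.1 + p.2 * base with hv
    set w : Int := if 88 < PySem.Int.band v 8191 then 13 else 14 with hw
    have hw13 : 13 ≤ w ∧ w ≤ 14 := by
      rw [hw]; split_ifs <;> omega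
    have hstepP : pvStepPair base (b, n, out) p
        = pvDrain (PySem.Int.bor b (v <<< n.toNat)) (n + w) out := by
      simp only [pvStepPair]
      rw [← hv, ← hw]
    have hstepB : pvStepBig base (big, N) p
        = (PySem.Int.bor big (v <<< N.toNat), N + w) := by
      simp only [pvStepBig]
      rw [← hv, ← hw]
    rw [hstepP, hstepB]
    -- the OR into the big integer is the OR into the top of the byte stream
    have hNt : N.toNat = n.toNat + 8 * out.length := by omega
    have hshift : v <<< N.toNat = (v <<< n.toNat) * 2 ^ (8 * out.length) := by
      rw [Int.shiftLeft_eq, Int.shiftLeft_eq, hNt, pow_add]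
      push_cast
      ring
    obtain ⟨hlo0, hlo1⟩ := pvLo_bounds out h3
    have hbig : PySem.Int.bor big (v <<< N.toNat)
        = pvLo out + PySem.Int.bor b (v <<< n.toNat) * 2 ^ (8 * out.length) := by
      rw [h4, hshift]
      exact pvSplitOr (8 * out.length) (pvLo out) b (v <<< n.toNat) hlo0 hlo1
    -- drain
    obtain ⟨d1, d2, d3, d4, d5⟩ :=
      pvDrain_inv (n + w).toNat (PySem.Int.bor b (v <<< n.toNat)) (n + w) out rfl (by omega) h3
    set s1 := pvDrain (PySem.Int.bor b (v <<< n.toNat)) (n + w) out with hs1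
    exact ih s1.1 s1.2.1 s1.2.2 (PySem.Int.bor big (v <<< N.toNat)) (N + w)
      d4 d5 d1 (by rw [hbig, d2]) (by omega)

-- ---------- assembling the two ports ----------

lemma pvFloordiv8 (x : Int) (L : Nat) (n : Int) (h1 : 0 ≤ n) (h2 : n ≤ 7) (hx : x = n + 8 * L) :
    PySem.Int.floordiv x 8 = (L : Int) := by
  rw [PySem.Int.floordiv_eq_ediv_of_pos (by norm_num)]
  omega

lemma pvRangeMap (M : Nat) (f : Int → Int) :
    (PySem.List.pyRange 0 (M : Int) 1).map f = (List.range M).map (fun k : Nat => f (k : Int)) := by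
  rw [PySem.List.pyRange_one]
  simp [List.map_map, Function.comp]


-- ===== VERDICT (by name: the statement is the Claim_ definition above) =====
theorem base91_92_decode_py_spec : Claim_equal_base91_92_decode_py := by
  intro text chars base _ hpre
  unfold Pre_base91_92_decode_py at hpre
  simp only [Spec_base91_92_decode_py, base91_92_decode_py, base91_92_decode_py_alt]
  have hposd : (text.toList.filterMap fun c =>
      (((PySem.List.enumerate chars.toList 0).foldl
        (fun (d : PySem.Dict Char Int) p => d.setdefault p.2 p.1) PySem.Dict.empty).get? c))
      = pvIdxs text.toList chars.toList := by
    apply List.filterMap_congr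
    intro c _
    rw [pvPos_get? chars.toList 0 PySem.Dict.empty c]
    simp [pvIdxs, PySem.Dict.get?_empty]
  rw [hposd, pvFoldA_eq,
    pvFoldIdx_pairs base (pvIdxs text.toList chars.toList)
      (pvIdxs_nonneg text.toList chars.toList) 0 0 []]
  set l := pvIdxs text.toList chars.toList with hl
  obtain ⟨hok, hbig, hN, hn0, hn7⟩ :=
    pvPairs_inv base (pvToPairs l) 0 0 [] 0 0 le_rfl (by norm_num)
      (by intro o ho; simp at ho) (by simp [pvLo]) (by simp)
  set s := (pvToPairs l).foldl (pvStepPair base) (0, 0, ([] : List Int)) with hs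
  set st := (pvToPairs l).foldl (pvStepBig base) ((0 : Int), (0 : Int)) with hst
  have hfd : PySem.Int.floordiv st.2 8 = (s.2.2.length : Int) :=
    pvFloordiv8 st.2 s.2.2.length s.2.1 hn0 hn7 hN
  by_cases hodd : l.length % 2 = 1
  · -- odd: trailing byte
    have hg : (0 : Int) ≤ l.getLast?.getD 0 := by
      cases hgl : l.getLast? with
      | none => simp
      | some x =>
        have hx : x ∈ l := List.mem_of_getLast? hgl
        simpa [hgl] using pvIdxs_nonneg text.toList chars.toList x hx
    rw [if_pos hodd, if_pos hodd]
    set g := l.getLast?.getD 0 with hgdef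
    dsimp only
    rw [if_pos (by omega : g + 1 ≠ 0)]
    set tA := PySem.Int.bor s.1 (g <<< s.2.1.toNat) with htA
    have hNt : st.2.toNat = s.2.1.toNat + 8 * s.2.2.length := by omega
    have hshift : g <<< st.2.toNat = (g <<< s.2.1.toNat) * 2 ^ (8 * s.2.2.length) := by
      rw [Int.shiftLeft_eq, Int.shiftLeft_eq, hNt, pow_add]
      push_cast
      ring
    obtain ⟨hlo0, hlo1⟩ := pvLo_bounds s.2.2 hok
    have hborB : PySem.Int.bor st.1 (g <<< st.2.toNat)
        = pvLo s.2.2 + tA * 2 ^ (8 * s.2.2.length) := by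
      rw [hbig, hshift, htA]
      exact pvSplitOr (8 * s.2.2.length) (pvLo s.2.2) s.1 (g <<< s.2.1.toNat) hlo0 hlo1
    have hdiv : st.2.toNat / 8 = s.2.2.length := by omega
    have htr : pvTrail text.toList chars.toList base = tA := by
      have hunfold : pvTrail text.toList chars.toList base
          = (PySem.Int.bor
              (((pvIdxs text.toList chars.toList).foldl (pvTrailStep base) (none, 0, 0)).2.1
              )
              (((pvIdxs text.toList chars.toList).getLast?.getD 0)
                <<< ((pvIdxs text.toList chars.toList).foldl (pvTrailStep base) (none, 0, 0)).2.2.toNat))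
            >>> (8 * (((pvIdxs text.toList chars.toList).foldl (pvTrailStep base) (none, 0, 0)).2.2.toNat / 8)) := rfl
      have hfold := pvTrailFold base (pvIdxs text.toList chars.toList) 0 0
      rw [hunfold]
      rw [show ((pvIdxs text.toList chars.toList).foldl (pvTrailStep base) (none, 0, 0)).2.1
          = ((pvToPairs (pvIdxs text.toList chars.toList)).foldl (pvStepBig base) (0, 0)).1 from by rw [hfold]]
      rw [show ((pvIdxs text.toList chars.toList).foldl (pvTrailStep base) (none, 0, 0)).2.2
          = ((pvToPairs (pvIdxs text.toList chars.toList)).foldl (pvStepBig base) (0, 0)).2 from by rw [hfold]]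
      rw [← hl, ← hst, ← hgdef, hdiv, hborB]
      exact pvHigh_lo s.2.2 hok tA
    have hbound : 0 ≤ tA ∧ tA ≤ 255 := by
      rcases hpre with h | h
      · omega
      · rw [htr] at h
        exact h
    have hfd1 : PySem.Int.floordiv st.2 8 + 1 = ((s.2.2.length + 1 : Nat) : Int) := by
      rw [hfd]
      push_cast
      ring
    rw [hfd1, hborB, pvRangeMap (s.2.2.length + 1)
      (fun i => PySem.Int.band ((pvLo s.2.2 + tA * 2 ^ (8 * s.2.2.length)) >>> (8 * i.toNat)) 255)]
    simp only [Int.toNat_natCast]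
    rw [pvExtract1 s.2.2 hok tA hbound.1 hbound.2]
  · -- even: no trailing byte
    rw [if_neg hodd, if_neg hodd]
    dsimp only
    rw [if_neg (by norm_num : ¬ ((-1 : Int) + 1 ≠ 0))]
    rw [hfd, hbig, pvRangeMap s.2.2.length
      (fun i => PySem.Int.band ((pvLo s.2.2 + s.1 * 2 ^ (8 * s.2.2.length)) >>> (8 * i.toNat)) 255)]
    simp only [Int.toNat_natCast]
    rw [pvExtract s.2.2 hok s.1]
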